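-- pv_equiv track=rewrite | github.com/Drom0s137/pacemaker_3x03_27 | DCM_27/RegistrationWindow.py | charactersCheck
-- ===== SOURCE A (Python) =====
-- def charactersCheck(text):
--     invalid = 0
--     for c in text:
--         #if (c=="(" or c==")" or c=="," or c=="." or c==" " or c=="&" or c=="%" or c=="^" or c=="*" or c=="=" or c=="+" or c=="/" or c=="|" or c=="[" or c=="]" or c=="{" or c=="}" or c==";" or c==":" or c=="'" or c=='"' or c=="<" or c==">" or c=="?"):
--         if ((ord(c)>=48 and ord(c)<=57) or (ord(c)>=65 and ord(c)<=90) or (ord(c)>=97 and ord(c)<=122) or ord(c)==45 or ord(c)==95):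
--             pass
--         else:
--             invalid = 1
--     if (invalid==0):
--         return True
--     else:
--         return False
-- ===== SOURCE B (Python) =====
-- import re
--
-- _ALLOWED = re.compile(r'[A-Za-z0-9_-]*')
--
-- def charactersCheck(text):
--     return _ALLOWED.fullmatch(text) is not None
-- ===== Notes on version B (the rewrite author's own statement) =====
-- stated objective: idiomatic
-- what changed: Replaced the per-character ord-range loop with a flag variable by a single anchored regex fullmatch against the character class [A-Za-z0-9_-]*, scanning the string in C rather than Python bytecode.
import Mathlib
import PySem

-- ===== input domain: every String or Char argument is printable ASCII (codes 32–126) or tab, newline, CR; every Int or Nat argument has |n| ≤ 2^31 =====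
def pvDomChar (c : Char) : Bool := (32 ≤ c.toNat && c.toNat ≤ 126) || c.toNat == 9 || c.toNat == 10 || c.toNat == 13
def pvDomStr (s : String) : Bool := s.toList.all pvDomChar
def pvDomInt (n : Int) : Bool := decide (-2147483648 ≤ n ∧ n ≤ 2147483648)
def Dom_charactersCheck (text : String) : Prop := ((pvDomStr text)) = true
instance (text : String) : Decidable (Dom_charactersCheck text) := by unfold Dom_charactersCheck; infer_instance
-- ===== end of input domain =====

-- B replaces A's ord-range loop with an accumulator flag by an anchored regex fullmatch
-- over the class [A-Za-z0-9_-]* (idiomatic; same behaviour, same cost).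

-- ===== PORT A =====
-- literal port of A: fold the `invalid` flag (a Python int) over the characters in order
def charactersCheck (text : String) : Bool :=
  let invalid : Int :=
    text.toList.foldl (fun invalid c =>
      if (48 ≤ (c.toNat : Int) ∧ (c.toNat : Int) ≤ 57) ∨
         (65 ≤ (c.toNat : Int) ∧ (c.toNat : Int) ≤ 90) ∨
         (97 ≤ (c.toNat : Int) ∧ (c.toNat : Int) ≤ 122) ∨
         (c.toNat : Int) = 45 ∨ (c.toNat : Int) = 95
      then invalid else 1) 0
  if invalid = 0 then true else false

-- ===== PORT B =====
-- port of B: re.fullmatch(r'[A-Za-z0-9_-]*', text) is not None.  A fullmatch of a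
-- single character class under '*' succeeds exactly when every character of the
-- string is in the class (and on the empty string); this is exact for that regex.
def pyAllowedClass (c : Char) : Bool :=
  (65 ≤ c.toNat && c.toNat ≤ 90) || (97 ≤ c.toNat && c.toNat ≤ 122) ||
  (48 ≤ c.toNat && c.toNat ≤ 57) || c.toNat == 95 || c.toNat == 45

def charactersCheck_alt (text : String) : Bool :=
  text.toList.all pyAllowedClass

-- ===== PRECONDITION & SPEC =====
def Spec_charactersCheck (text : String) (out : Bool) : Prop := out = charactersCheck_alt text
instance (text : String) (out : Bool) : Decidable (Spec_charactersCheck text out) := by unfold Spec_charactersCheck; infer_instance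

-- ===== CLAIM (what is proved, stated in full; the proofs are below) =====
def Claim_equal_charactersCheck : Prop := ∀ (text : String), Dom_charactersCheck text → Spec_charactersCheck text (charactersCheck text)

-- ===== LEMMAS AND PROOFS =====

theorem pvStep_eq (c : Char) (invalid : Int) :
    (if (48 ≤ (c.toNat : Int) ∧ (c.toNat : Int) ≤ 57) ∨
        (65 ≤ (c.toNat : Int) ∧ (c.toNat : Int) ≤ 90) ∨
        (97 ≤ (c.toNat : Int) ∧ (c.toNat : Int) ≤ 122) ∨
        (c.toNat : Int) = 45 ∨ (c.toNat : Int) = 95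
     then invalid else 1) = (if pyAllowedClass c then invalid else 1) := by
  have h : ((48 ≤ (c.toNat : Int) ∧ (c.toNat : Int) ≤ 57) ∨
      (65 ≤ (c.toNat : Int) ∧ (c.toNat : Int) ≤ 90) ∨
      (97 ≤ (c.toNat : Int) ∧ (c.toNat : Int) ≤ 122) ∨
      (c.toNat : Int) = 45 ∨ (c.toNat : Int) = 95) ↔ pyAllowedClass c = true := by
    simp only [pyAllowedClass, Bool.or_eq_true, Bool.and_eq_true, decide_eq_true_eq,
      beq_iff_eq]
    omega
  rw [if_congr h rfl rfl]

theorem pvFold_eq (l : List Char) (invalid : Int) :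
    l.foldl (fun invalid c =>
      if (48 ≤ (c.toNat : Int) ∧ (c.toNat : Int) ≤ 57) ∨
         (65 ≤ (c.toNat : Int) ∧ (c.toNat : Int) ≤ 90) ∨
         (97 ≤ (c.toNat : Int) ∧ (c.toNat : Int) ≤ 122) ∨
         (c.toNat : Int) = 45 ∨ (c.toNat : Int) = 95
      then invalid else 1) invalid =
    (if l.all pyAllowedClass then invalid else 1) := by
  induction l generalizing invalid with
  | nil => simp
  | cons c t ih =>
    rw [List.foldl_cons, pvStep_eq]
    by_cases h : pyAllowedClass c = true
    · rw [if_pos h, ih, List.all_cons]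
      simp [h]
    · rw [if_neg h, ih 1, List.all_cons]
      simp [h]

-- ===== VERDICT (by name: the statement is the Claim_ definition above) =====
theorem charactersCheck_spec : Claim_equal_charactersCheck := by
  intro text _
  unfold Spec_charactersCheck charactersCheck charactersCheck_alt
  simp only [pvFold_eq]
  by_cases h : text.toList.all pyAllowedClass = true <;> simp [h]
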